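-- pv_equiv track=rewrite | github.com/paul905/advent_of_code_2025 | day2/gift_shop_part_two.py | is_sequence_of_digits
-- ===== SOURCE A (Python) =====
-- def is_sequence_of_digits(n:int) -> bool:
--     '''
--     Return true if the number is a sequence of digits repeated AT LEAST twice
--     '''
--     id_str = str(n)
--     id_len = len(id_str)
--     divisors = [x for x in range(1,id_len) if id_len % x == 0]
--
--     sequences = []
--     start = 0
--     for divisor in divisors:
--         for i in range(divisor,id_len+1,divisor):
--             sequences.append(id_str[start:i])
--             start += divisor
--
--         if(len(set(sequences)) == 1):
--             return True
--
--         sequences.clear()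
--         start = 0
--
--     return False
-- ===== SOURCE B (Python) =====
-- def is_sequence_of_digits(n: int) -> bool:
--     '''
--     Return true if the number is a sequence of digits repeated AT LEAST twice
--     '''
--     s = str(n)
--     return s in (s + s)[1:-1]
-- ===== Notes on version B (the rewrite author's own statement) =====
-- stated objective: idiomatic
-- what changed: Replaces the divisor enumeration with equal-chunk set comparison by the classic doubled-string periodicity test: s is a repeated block iff s occurs inside (s+s)[1:-1].
import Mathlib
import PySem

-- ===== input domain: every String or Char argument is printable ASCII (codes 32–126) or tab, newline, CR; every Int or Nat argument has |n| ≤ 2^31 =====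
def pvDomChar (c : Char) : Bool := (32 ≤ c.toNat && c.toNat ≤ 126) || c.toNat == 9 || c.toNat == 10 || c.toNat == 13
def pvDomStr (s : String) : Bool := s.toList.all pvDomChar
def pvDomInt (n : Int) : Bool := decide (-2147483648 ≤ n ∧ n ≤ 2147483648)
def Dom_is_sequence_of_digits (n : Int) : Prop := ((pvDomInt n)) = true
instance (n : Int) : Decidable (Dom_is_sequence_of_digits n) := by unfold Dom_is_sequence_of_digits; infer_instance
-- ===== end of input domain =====

-- B replaces A's divisor/chunk-set enumeration with the doubled-string periodicity test s in (s+s)[1:-1].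

-- ===== PORT A =====
-- inner loop: for i in range(divisor, id_len+1, divisor): sequences.append(id_str[start:i]); start += divisor
def pvInnerA (idStr : List Char) (idLen d : Int) : List (List Char) × Int :=
  (PySem.List.pyRange d (idLen + 1) d).foldl
    (fun st i => (st.1 ++ [PySem.List.slice idStr (some st.2) (some i)], st.2 + d))
    ([], 0)

-- outer loop over divisors with early return True
def pvOuterA (idStr : List Char) (idLen : Int) : List Int → Bool
  | [] => false
  | d :: rest =>
    if (PySem.List.dedup (pvInnerA idStr idLen d).1).length = 1 then true
    else pvOuterA idStr idLen rest

def is_sequence_of_digits (n : Int) : Bool :=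
  let idStr := (PySem.Int.toStr n).toList
  let idLen : Int := PySem.Str.len (PySem.Int.toStr n)
  let divisors := (PySem.List.pyRange 1 idLen 1).filter (fun x => PySem.Int.mod idLen x == 0)
  pvOuterA idStr idLen divisors

-- ===== PORT B =====
-- s = str(n); return s in (s+s)[1:-1]
def is_sequence_of_digits_alt (n : Int) : Bool :=
  let s := (PySem.Int.toStr n).toList
  PySem.Chars.isIn s (PySem.List.slice (s ++ s) (some 1) (some (-1)))

-- ===== PRECONDITION & SPEC =====
def Spec_is_sequence_of_digits (n : Int) (out : Bool) : Prop := out = is_sequence_of_digits_alt n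
instance (n : Int) (out : Bool) : Decidable (Spec_is_sequence_of_digits n out) := by unfold Spec_is_sequence_of_digits; infer_instance

-- ===== CLAIM (what is proved, stated in full; the proofs are below) =====
def Claim_equal_is_sequence_of_digits : Prop := ∀ (n : Int), Dom_is_sequence_of_digits n → Spec_is_sequence_of_digits n (is_sequence_of_digits n)

-- ===== LEMMAS AND PROOFS =====

-- the j-th length-d chunk of s
def pvChunk (s : List Char) (d j : Nat) : List Char := (s.drop (j * d)).take d

-- str(n) is never empty
theorem pv_toChars_ne_nil (n : Int) : PySem.Int.toChars n ≠ [] := by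
  unfold PySem.Int.toChars; split
  · simp
  · have := Nat.length_toDigits_pos (b := 10) (n := n.toNat); intro h; simp [h] at this

-- range(d, m*d+1, d) enumerates the d-multiples d, 2d, …, m*d
theorem pv_range_eq (d m : Nat) (hd : 0 < d) :
    PySem.List.pyRange (d : Int) (((m * d : Nat) : Int) + 1) (d : Int)
      = (List.range m).map (fun k : Nat => (d : Int) + d * (k : Int)) := by
  have hne : (d : Int) ≠ 0 := Int.natCast_ne_zero.mpr (by omega)
  have hpos : (0 : Int) < d := by exact_mod_cast hd
  unfold PySem.List.pyRange
  rw [if_neg hne, if_pos hpos]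
  rcases Nat.eq_zero_or_pos m with rfl | hm
  · rw [if_neg (by push_cast; omega)]
  · rw [if_pos (by push_cast; nlinarith)]
    have hnum : ((m * d : Nat) : Int) + 1 - d + d - 1 = (m : Int) * d := by push_cast; ring
    rw [hnum, Int.mul_ediv_cancel _ hne]
    simp

-- the inner loop's fold collects the chunks and advances start by d each step
theorem pv_fold_eq (s : List Char) (d : Nat) : ∀ t,
    ((List.range t).map (fun k : Nat => (d : Int) + d * (k : Int))).foldl
        (fun st i => (st.1 ++ [PySem.List.slice s (some st.2) (some i)], st.2 + d))
        ([], 0)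
      = ((List.range t).map (pvChunk s d), ((t * d : Nat) : Int)) := by
  intro t
  induction t with
  | zero => simp
  | succ t iht =>
    rw [List.range_succ, List.map_append, List.foldl_append, iht, List.map_append]
    simp only [List.map_cons, List.map_nil, List.foldl_cons, List.foldl_nil]
    have h1 : (d : Int) + d * t = ((t * d : Nat) : Int) + ((d : Nat) : Int) := by push_cast; ring
    rw [h1, PySem.List.slice_natCast_add]
    refine Prod.ext rfl ?_
    show ((t * d : Nat) : Int) + d = (((t + 1) * d : Nat) : Int)
    push_cast; ring

-- the inner loop produces exactly the chunk list
theorem pv_inner_eq (s : List Char) (d m : Nat) (hd : 0 < d) (hL : s.length = m * d) :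
    (pvInnerA s (s.length : Int) (d : Int)).1 = (List.range m).map (pvChunk s d) := by
  unfold pvInnerA
  rw [hL, pv_range_eq d m hd, pv_fold_eq s d m]

-- len(set(xs)) == 1 says: xs is nonempty and all its elements are equal
theorem pv_dedup_len_one {α : Type} [BEq α] [LawfulBEq α] (xs : List α) :
    (PySem.List.dedup xs).length = 1 ↔ xs ≠ [] ∧ ∀ x ∈ xs, ∀ y ∈ xs, x = y := by
  constructor
  · intro h
    obtain ⟨a, ha⟩ := List.length_eq_one_iff.mp h
    have hmem : ∀ x ∈ xs, x = a := by
      intro x hx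
      have := (PySem.List.mem_dedup xs x).mpr hx
      rw [ha] at this; simpa using this
    have hne : xs ≠ [] := by
      intro h0
      have ha' : a ∈ PySem.List.dedup xs := by rw [ha]; simp
      have := (PySem.List.mem_dedup xs a).mp ha'
      rw [h0] at this; simp at this
    exact ⟨hne, fun x hx y hy => (hmem x hx).trans (hmem y hy).symm⟩
  · rintro ⟨hne, hall⟩
    obtain ⟨z, t, rfl⟩ := List.exists_cons_of_ne_nil hne
    have hz : z ∈ PySem.List.dedup (z :: t) := (PySem.List.mem_dedup _ _).mpr (by simp)
    have hnd := PySem.List.nodup_dedup (z :: t)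
    have hmem : ∀ u ∈ PySem.List.dedup (z :: t), u = z := by
      intro u hu
      exact hall u ((PySem.List.mem_dedup _ _).mp hu) z (by simp)
    match hd : PySem.List.dedup (z :: t) with
    | [] => rw [hd] at hz; simp at hz
    | a :: r =>
      rw [hd] at hmem hnd
      have ha : a = z := hmem a (by simp)
      have : r = [] := by
        cases r with
        | nil => rfl
        | cons b rb =>
          have hb : b = z := hmem b (by simp)
          rw [ha, hb] at hnd; simp at hnd
      simp [this]

-- rotation by d makes every chunk equal to the first
theorem pv_rotate_chunk (s : List Char) (d : Nat) (hdL : d ≤ s.length)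
    (hrot : s.rotate d = s) :
    ∀ j, (j + 1) * d ≤ s.length → pvChunk s d j = s.take d := by
  have hda : s.drop d ++ s.take d = s := by
    rw [← List.rotate_eq_drop_append_take hdL]; exact hrot
  have hdt : s.drop d = s.take (s.length - d) := by
    have h2 := congrArg (List.take (s.length - d)) hda
    rw [List.take_left' (by simp)] at h2
    exact h2
  intro j
  induction j with
  | zero => intro _; simp [pvChunk]
  | succ j ih =>
    intro hj
    have hj' : (j + 1) * d ≤ s.length := by nlinarith
    have h1 : pvChunk s d (j + 1) = ((s.drop d).drop (j * d)).take d := by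
      rw [pvChunk, List.drop_drop]
      congr 2
      ring
    rw [h1, hdt, List.drop_take, List.take_take]
    have hmin : min d (s.length - d - j * d) = d := by
      have : (j + 1 + 1) * d = j * d + d + d := by ring
      omega
    rw [hmin]
    exact ih hj'

-- equal chunks tile s by its first d characters
theorem pv_chunks_tile (d : Nat) :
    ∀ m, ∀ s' : List Char, s'.length = m * d → (∀ j < m, pvChunk s' d j = s'.take d) →
      s' = (List.replicate m (s'.take d)).flatten := by
  intro m
  induction m with
  | zero => intro s' hlen _; simp at hlen ⊢; exact hlen
  | succ m ih =>
    intro s' hlen hch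
    have hdle : d ≤ s'.length := by nlinarith
    have hdrop_len : (s'.drop d).length = m * d := by simp [hlen]; ring_nf; omega
    have hch' : ∀ j < m, pvChunk (s'.drop d) d j = (s'.drop d).take d := by
      intro j hj
      have e1 : pvChunk (s'.drop d) d j = pvChunk s' d (j + 1) := by
        rw [pvChunk, pvChunk, List.drop_drop]
        congr 2; ring
      have e2 : pvChunk (s'.drop d) d 0 = pvChunk s' d 1 := by
        rw [pvChunk, pvChunk]; simp
      cases m with
      | zero => omega
      | succ m' =>
        rw [e1, hch (j + 1) (by omega), ← hch 1 (by omega), ← e2, pvChunk]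
        simp
    have ihd := ih (s'.drop d) hdrop_len hch'
    rcases Nat.eq_zero_or_pos m with rfl | hm
    · have h0 : s'.drop d = [] := by
        rw [← List.length_eq_zero_iff]; omega
      conv_lhs => rw [← List.take_append_drop d s']
      rw [h0]; simp
    · have hblock : (s'.drop d).take d = s'.take d := by
        have h1 := hch 1 (by omega)
        rw [pvChunk] at h1; simpa using h1
      conv_lhs => rw [← List.take_append_drop d s']
      rw [ihd, hblock, List.replicate_succ, List.flatten_cons]

-- a tiling is rotation-invariant by the block length
theorem pv_tile_rotate (b : List Char) (m : Nat) (hm : 0 < m) :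
    ((List.replicate m b).flatten).rotate b.length = (List.replicate m b).flatten := by
  obtain ⟨m', rfl⟩ := Nat.exists_eq_succ_of_ne_zero (Nat.pos_iff_ne_zero.mp hm)
  have hX : (List.replicate (m' + 1) b).flatten = b ++ (List.replicate m' b).flatten := by
    simp [List.replicate_succ]
  have hlen : b.length ≤ (b ++ (List.replicate m' b).flatten).length := by simp
  conv_lhs => rw [hX]
  rw [List.rotate_eq_drop_append_take hlen, List.drop_left, List.take_left,
    List.replicate_succ']
  simp

-- a nontrivial fixing rotation yields a proper-divisor fixing rotation (Euclid on the shift)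
theorem pv_rot_to_div (s : List Char) :
    ∀ k, 0 < k → k < s.length → s.rotate k = s →
      ∃ d, 0 < d ∧ d < s.length ∧ d ∣ s.length ∧ s.rotate d = s := by
  intro k
  induction k using Nat.strong_induction_on with
  | _ k ih =>
    intro hk0 hkL hrot
    by_cases hdvd : k ∣ s.length
    · exact ⟨k, hk0, hkL, hdvd, hrot⟩
    · have hmul : ∀ t, s.rotate (t * k) = s := by
        intro t
        induction t with
        | zero => simp
        | succ t iht => rw [Nat.succ_mul, ← List.rotate_rotate, iht, hrot]
      have hr0 : 0 < s.length % k := Nat.pos_of_ne_zero (fun h => hdvd (Nat.dvd_of_mod_eq_zero h))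
      have hrk : s.length % k < k := Nat.mod_lt _ hk0
      have hLr : s.length - s.length % k = (s.length / k) * k := by
        have := Nat.div_add_mod s.length k
        rw [Nat.mul_comm]; omega
      have hrotr : s.rotate (s.length % k) = s := by
        have h1 : s.rotate (s.length - s.length % k) = s := by rw [hLr]; exact hmul _
        calc s.rotate (s.length % k)
            = (s.rotate (s.length - s.length % k)).rotate (s.length % k) := by rw [h1]
          _ = s.rotate (s.length - s.length % k + s.length % k) := List.rotate_rotate _ _ _
          _ = s.rotate s.length := by congr 1; omega
          _ = s := List.rotate_length s
      exact ih _ hrk hr0 (by omega) hrotr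

-- (s+s)[1:-1] drops the first and last characters of s+s
theorem pv_interior_eq (s : List Char) (hs : s ≠ []) :
    PySem.List.slice (s ++ s) (some 1) (some (-1)) = s.tail ++ s.dropLast := by
  have hL : 0 < s.length := List.length_pos_iff.mpr hs
  have e : PySem.List.slice (s ++ s) (some 1) (some (-1)) =
      List.take (PySem.List.clampIdx (s ++ s).length (-1) - PySem.List.clampIdx (s ++ s).length 1)
        (List.drop (PySem.List.clampIdx (s ++ s).length 1) (s ++ s)) := rfl
  rw [e, PySem.List.clampIdx_neg_one]
  have h1 : PySem.List.clampIdx (s ++ s).length 1 = 1 := by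
    simp [PySem.List.clampIdx]; omega
  rw [h1]
  obtain ⟨c, s', rfl⟩ := List.exists_cons_of_ne_nil hs
  have hdrop : List.drop 1 ((c :: s') ++ (c :: s')) = s' ++ (c :: s') := rfl
  rw [hdrop]
  have hlen : (c :: s' ++ (c :: s')).length - 1 - 1 = s'.length + s'.length := by
    simp
  rw [hlen, List.take_append]
  have h2 : s'.length + s'.length - s'.length = s'.length := by omega
  rw [List.take_of_length_le (by simp), h2]
  congr 1
  rw [List.dropLast_eq_take]
  congr 1

-- B's containment test says: some nontrivial rotation fixes s
theorem pv_B_char (s : List Char) (hs : s ≠ []) :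
    PySem.Chars.isIn s (s.tail ++ s.dropLast) = true ↔
      ∃ k, 0 < k ∧ k < s.length ∧ s.rotate k = s := by
  have hL : 0 < s.length := List.length_pos_iff.mpr hs
  rw [← PySem.Chars.exists_prefix_drop_iff_isIn]
  constructor
  · rintro ⟨j, hpre⟩
    have hlen := hpre.length_le
    rw [List.length_drop, List.length_append, List.length_tail, List.length_dropLast] at hlen
    have hj : j + 1 ≤ s.length - 1 := by omega
    have hL2 : 2 ≤ s.length := by omega
    have hdrop : (s.tail ++ s.dropLast).drop j = s.drop (1 + j) ++ s.dropLast := by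
      rw [List.drop_append_of_le_length (by simp [List.length_tail]; omega)]
      congr 1
      rw [← List.drop_one, List.drop_drop]
    rw [hdrop] at hpre
    have heq := List.prefix_iff_eq_take.mp hpre
    rw [List.take_append, List.take_of_length_le (by simp)] at heq
    have hlen2 : s.length - (s.drop (1 + j)).length = j + 1 := by simp; omega
    rw [hlen2, List.dropLast_eq_take, List.take_take] at heq
    have hmin : min (j + 1) (s.length - 1) = j + 1 := by omega
    rw [hmin] at heq
    refine ⟨j + 1, by omega, by omega, ?_⟩
    rw [List.rotate_eq_drop_append_take (by omega)]
    rw [Nat.add_comm 1 j] at heq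
    exact heq.symm
  · rintro ⟨k, hk0, hkL, hrot⟩
    refine ⟨k - 1, ?_⟩
    have hdrop : (s.tail ++ s.dropLast).drop (k - 1) = s.drop k ++ s.dropLast := by
      rw [List.drop_append_of_le_length (by simp [List.length_tail]; omega)]
      congr 1
      rw [← List.drop_one, List.drop_drop]
      congr 1; omega
    rw [hdrop]
    have hpre2 : s.take k <+: s.dropLast := by
      rw [List.dropLast_eq_take]
      have h3 : s.take k = (s.take (s.length - 1)).take k := by
        rw [List.take_take]; congr 1; omega
      rw [h3]
      exact List.take_prefix _ _
    have h4 := (List.prefix_append_right_inj (s.drop k)).mpr hpre2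
    rw [← List.rotate_eq_drop_append_take (by omega), hrot] at h4
    exact h4

-- A's outer loop is an existential over the divisor list
theorem pv_outer_iff (s : List Char) (L : Int) (l : List Int) :
    pvOuterA s L l = true ↔
      ∃ d ∈ l, (PySem.List.dedup (pvInnerA s L d).1).length = 1 := by
  induction l with
  | nil => simp [pvOuterA]
  | cons d rest ih =>
    simp only [pvOuterA]
    split
    · next h =>
      constructor
      · intro _; exact ⟨d, by simp, h⟩
      · intro _; rfl
    · next h =>
      rw [ih]
      constructor
      · rintro ⟨e, he, hc⟩; exact ⟨e, by simp [he], hc⟩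
      · rintro ⟨e, he, hc⟩
        rcases List.mem_cons.mp he with rfl | he'
        · exact absurd hc h
        · exact ⟨e, he', hc⟩

-- A's check for one divisor d says: rotation by d fixes s
theorem pv_check_iff (s : List Char) (d : Nat) (hd : 0 < d) (hdL : d < s.length)
    (hdvd : d ∣ s.length) :
    (PySem.List.dedup (pvInnerA s (s.length : Int) (d : Int)).1).length = 1 ↔
      s.rotate d = s := by
  obtain ⟨m, hm⟩ := hdvd
  have hL : s.length = m * d := by rw [hm]; ring
  have hm2 : 2 ≤ m := by
    rcases m with _ | _ | m
    · omega
    · omega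
    · omega
  rw [pv_inner_eq s d m hd hL, pv_dedup_len_one]
  constructor
  · rintro ⟨_, hall⟩
    have hch : ∀ j < m, pvChunk s d j = s.take d := by
      intro j hj
      have hjm : pvChunk s d j ∈ (List.range m).map (pvChunk s d) :=
        List.mem_map.mpr ⟨j, List.mem_range.mpr hj, rfl⟩
      have h0m : pvChunk s d 0 ∈ (List.range m).map (pvChunk s d) :=
        List.mem_map.mpr ⟨0, List.mem_range.mpr (by omega), rfl⟩
      have := hall _ hjm _ h0m
      rw [this, pvChunk]
      simp
    have htile := pv_chunks_tile d m s hL hch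
    have hrot := pv_tile_rotate (s.take d) m (by omega)
    rw [← htile, List.length_take, min_eq_left hdL.le] at hrot
    exact hrot
  · intro hrot
    refine ⟨by simp; omega, ?_⟩
    have hch : ∀ x ∈ (List.range m).map (pvChunk s d), x = s.take d := by
      intro x hx
      obtain ⟨j, hj, rfl⟩ := List.mem_map.mp hx
      exact pv_rotate_chunk s d hdL.le hrot j
        (by rw [hL]; exact Nat.mul_le_mul_right d (List.mem_range.mp hj))
    intro x hx y hy
    rw [hch x hx, hch y hy]

-- the two cores agree on every nonempty string
theorem pv_main (s : List Char) (hs : s ≠ []) :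
    pvOuterA s (s.length : Int)
        ((PySem.List.pyRange 1 (s.length : Int) 1).filter
          (fun x => PySem.Int.mod (s.length : Int) x == 0))
      = PySem.Chars.isIn s (PySem.List.slice (s ++ s) (some 1) (some (-1))) := by
  rw [pv_interior_eq s hs, Bool.eq_iff_iff, pv_outer_iff, pv_B_char s hs]
  constructor
  · rintro ⟨dI, hmem, hchk⟩
    rw [List.mem_filter, PySem.List.mem_pyRange_one] at hmem
    obtain ⟨⟨h1, h2⟩, h3⟩ := hmem
    have hdvdI : dI ∣ (s.length : Int) := PySem.Int.mod_eq_zero_iff_dvd _ _ |>.mp (by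
      exact beq_iff_eq.mp h3)
    have hdI : dI = ((dI.toNat : Nat) : Int) := (Int.toNat_of_nonneg (by omega)).symm
    rw [hdI] at hchk hdvdI
    have hdvd : dI.toNat ∣ s.length := Int.natCast_dvd_natCast.mp hdvdI
    refine ⟨dI.toNat, by omega, by omega, ?_⟩
    exact (pv_check_iff s dI.toNat (by omega) (by omega) hdvd).mp hchk
  · rintro ⟨k, hk0, hkL, hrot⟩
    obtain ⟨d, hd0, hdL, hdvd, hrotd⟩ := pv_rot_to_div s k hk0 hkL hrot
    refine ⟨(d : Int), ?_, ?_⟩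
    · rw [List.mem_filter, PySem.List.mem_pyRange_one]
      refine ⟨⟨by omega, by omega⟩, ?_⟩
      exact beq_iff_eq.mpr ((PySem.Int.mod_eq_zero_iff_dvd _ _).mpr
        (Int.natCast_dvd_natCast.mpr hdvd))
    · exact (pv_check_iff s d hd0 hdL hdvd).mpr hrotd

-- ===== VERDICT (by name: the statement is the Claim_ definition above) =====
theorem is_sequence_of_digits_spec : Claim_equal_is_sequence_of_digits := by
  intro n _
  unfold Spec_is_sequence_of_digits is_sequence_of_digits is_sequence_of_digits_alt
  simp only [PySem.Str.len_eq, PySem.Int.toList_toStr]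
  exact (pv_main (PySem.Int.toChars n) (pv_toChars_ne_nil n)).symm ▸ rfl
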